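-- pv_equiv track=rewrite | github.com/st6aaaaaa/ds- | bit_manipulation.py | func
-- ===== SOURCE A (Python) =====
-- def func(nums1,nums2):
--     res_b = 0
--     res = 0
--
--     for j in nums2:
--         res_b ^= j
--
--     if len(nums2) % 2 == 0:
--         for i in nums1:
--             res ^= res_b
--     else:
--         for a in nums1:
--             res = res ^ a ^ res_b
--     return res
-- ===== SOURCE B (Python) =====
-- def func(nums1, nums2):
--     xor1 = 0
--     for a in nums1:
--         xor1 ^= a
--     xor2 = 0
--     for b in nums2:
--         xor2 ^= b
--     res = 0
--     if len(nums1) % 2 == 1: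
--         res ^= xor2
--     if len(nums2) % 2 == 1:
--         res ^= xor1
--     return res
-- ===== Notes on version B (the rewrite author's own statement) =====
-- stated objective: simpler
-- what changed: A's branch that re-XORs the fixed value XOR(nums2) into the accumulator once per element of nums1 (and its twin branch mixing in each element) is replaced by two plain XOR reductions plus two parity tests on the lengths: res = (xor2 if len(nums1) odd) ^ (xor1 if len(nums2) odd).
import Mathlib
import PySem

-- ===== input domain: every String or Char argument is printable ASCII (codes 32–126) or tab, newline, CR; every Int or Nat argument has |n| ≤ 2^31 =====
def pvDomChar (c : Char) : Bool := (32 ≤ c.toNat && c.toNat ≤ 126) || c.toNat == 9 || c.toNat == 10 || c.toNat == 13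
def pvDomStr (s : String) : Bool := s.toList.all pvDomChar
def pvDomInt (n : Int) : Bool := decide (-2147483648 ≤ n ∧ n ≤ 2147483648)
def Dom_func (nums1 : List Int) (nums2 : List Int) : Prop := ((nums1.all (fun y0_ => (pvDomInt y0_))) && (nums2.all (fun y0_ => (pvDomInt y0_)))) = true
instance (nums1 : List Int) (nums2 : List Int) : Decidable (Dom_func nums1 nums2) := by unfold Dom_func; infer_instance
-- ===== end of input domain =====

-- B replaces A's per-element re-XOR of the fixed value XOR(nums2) with two plain XOR
-- reductions and two parity tests on the lengths (objective: simpler).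


-- ===== PORT A =====
def func (nums1 : List Int) (nums2 : List Int) : Int :=
  let res_b := nums2.foldl (fun r j => PySem.Int.bxor r j) 0
  if nums2.length % 2 == 0 then
    nums1.foldl (fun res _ => PySem.Int.bxor res res_b) 0
  else
    nums1.foldl (fun res a => PySem.Int.bxor (PySem.Int.bxor res a) res_b) 0

-- ===== PORT B =====
def func_alt (nums1 : List Int) (nums2 : List Int) : Int :=
  let xor1 := nums1.foldl (fun r a => PySem.Int.bxor r a) 0
  let xor2 := nums2.foldl (fun r b => PySem.Int.bxor r b) 0
  let res : Int := 0
  let res := if nums1.length % 2 == 1 then PySem.Int.bxor res xor2 else res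
  let res := if nums2.length % 2 == 1 then PySem.Int.bxor res xor1 else res
  res

-- ===== PRECONDITION & SPEC =====
def Spec_func (nums1 : List Int) (nums2 : List Int) (out : Int) : Prop := out = func_alt nums1 nums2
instance (nums1 : List Int) (nums2 : List Int) (out : Int) : Decidable (Spec_func nums1 nums2 out) := by unfold Spec_func; infer_instance

-- ===== CLAIM (what is proved, stated in full; the proofs are below) =====
def Claim_equal_func : Prop := ∀ (nums1 : List Int) (nums2 : List Int), Dom_func nums1 nums2 → Spec_func nums1 nums2 (func nums1 nums2)

-- ===== LEMMAS AND PROOFS =====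

theorem pv_bxor_eq_xor (a b : Int) : PySem.Int.bxor a b = Int.xor a b := by
  unfold PySem.Int.bxor
  cases a with
  | ofNat m => cases b with
    | ofNat n => simp [Int.xor]
    | negSucc n => simp [Int.xor, Int.negSucc_eq]; omega
  | negSucc m => cases b with
    | ofNat n => simp [Int.xor, Int.negSucc_eq]; omega
    | negSucc n => simp [Int.xor, Int.negSucc_eq]; omega

theorem pv_bxor_assoc (a b c : Int) :
    PySem.Int.bxor (PySem.Int.bxor a b) c = PySem.Int.bxor a (PySem.Int.bxor b c) := by
  simp only [pv_bxor_eq_xor]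
  cases a <;> cases b <;> cases c <;> simp [Int.xor, Nat.xor_assoc]

theorem pv_zero_bxor (a : Int) : PySem.Int.bxor 0 a = a := by
  rw [PySem.Int.bxor_comm]; exact PySem.Int.bxor_zero a

-- pull a foldl's initial accumulator out in front
theorem pv_foldl_bxor_init (l : List Int) (init : Int) :
    l.foldl (fun r a => PySem.Int.bxor r a) init
      = PySem.Int.bxor init (l.foldl (fun r a => PySem.Int.bxor r a) 0) := by
  induction l generalizing init with
  | nil => simp [PySem.Int.bxor_zero]
  | cons x xs ih =>
    simp only [List.foldl_cons]
    rw [ih (PySem.Int.bxor init x), ih (PySem.Int.bxor 0 x), pv_zero_bxor, pv_bxor_assoc]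

-- A's even branch: XOR-ing the constant c in once per element gives c iff the length is odd
theorem pv_foldl_const (l : List Int) (c init : Int) :
    l.foldl (fun r _ => PySem.Int.bxor r c) init
      = if l.length % 2 == 1 then PySem.Int.bxor init c else init := by
  induction l generalizing init with
  | nil => simp
  | cons x xs ih =>
    simp only [List.foldl_cons, List.length_cons, ih]
    by_cases hb : xs.length % 2 = 1
    · have h1 : (xs.length % 2 == 1) = true := by simp [hb]
      have h2 : ((xs.length + 1) % 2 == 1) = false := by simp; omega
      simp [h1, h2, pv_bxor_assoc, PySem.Int.bxor_self, PySem.Int.bxor_zero]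
    · have h1 : (xs.length % 2 == 1) = false := by simp; omega
      have h2 : ((xs.length + 1) % 2 == 1) = true := by simp; omega
      simp [h1, h2]

-- A's odd branch: mixing in a ^ c per element a gives XOR(l) ^ (c iff odd length)
theorem pv_foldl_mix (l : List Int) (c init : Int) :
    l.foldl (fun r a => PySem.Int.bxor (PySem.Int.bxor r a) c) init
      = PySem.Int.bxor (PySem.Int.bxor init (l.foldl (fun r a => PySem.Int.bxor r a) 0))
          (if l.length % 2 == 1 then c else 0) := by
  induction l generalizing init with
  | nil => simp [PySem.Int.bxor_zero]
  | cons x xs ih =>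
    simp only [List.foldl_cons, List.length_cons, ih]
    rw [pv_foldl_bxor_init xs (PySem.Int.bxor 0 x), pv_zero_bxor]
    by_cases hb : xs.length % 2 = 1
    · have h1 : (xs.length % 2 == 1) = true := by simp [hb]
      have h2 : ((xs.length + 1) % 2 == 1) = false := by simp; omega
      simp only [h1, h2, if_true, Bool.false_eq_true, if_false,
        pv_bxor_assoc, PySem.Int.bxor_zero]
      rw [PySem.Int.bxor_comm c, pv_bxor_assoc, PySem.Int.bxor_self, PySem.Int.bxor_zero]
    · have h1 : (xs.length % 2 == 1) = false := by simp; omega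
      have h2 : ((xs.length + 1) % 2 == 1) = true := by simp; omega
      simp only [h1, h2, if_true, Bool.false_eq_true, if_false,
        pv_bxor_assoc, PySem.Int.bxor_zero]
      rw [PySem.Int.bxor_comm c]

-- ===== VERDICT (by name: the statement is the Claim_ definition above) =====
theorem func_spec : Claim_equal_func := by
  intro nums1 nums2 _
  unfold Spec_func func func_alt
  by_cases hb : nums2.length % 2 = 1
  · have he : (nums2.length % 2 == 0) = false := by simp; omega
    have ho : (nums2.length % 2 == 1) = true := by simp [hb]
    simp only [he, ho, if_true, Bool.false_eq_true, if_false, pv_foldl_mix, pv_zero_bxor]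
    by_cases hc : nums1.length % 2 = 1
    · have h1 : (nums1.length % 2 == 1) = true := by simp [hc]
      simp only [h1, if_true]
      rw [PySem.Int.bxor_comm]
    · have h1 : (nums1.length % 2 == 1) = false := by simp; omega
      simp only [h1, Bool.false_eq_true, if_false, PySem.Int.bxor_zero, pv_zero_bxor]
  · have he : (nums2.length % 2 == 0) = true := by simp; omega
    have ho : (nums2.length % 2 == 1) = false := by simp; omega
    simp only [he, ho, if_true, Bool.false_eq_true, if_false, pv_foldl_const]
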